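-- pv_equiv track=rewrite | github.com/pypi-data/pypi-mirror-404 | packages/wuxctools/wuxctools-0.1.2.tar.gz/wuxctools-0.1.2/src/wuxctools/vasp/subcommand/parsepro.py | _coverage_label
-- ===== SOURCE A (Python) =====
-- ORBITAL_GROUPS = {
--     "p": ["px", "py", "pz"],
--     "d": ["dxy", "dyz", "dz2", "dxz", "dx2-y2"],
--     "f": ["fy3x2", "fxyz", "fyz2", "fz3", "fxz2", "fzx2", "fx3"],
-- }
--
-- ORBITAL_NUMBERS = {
--     "p": ["p1", "p2", "p3"],
--     "d": ["d4", "d5", "d6", "d7", "d8"],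
--     "f": ["f9", "f10", "f11", "f12", "f13", "f14", "f15"],
-- }
--
-- def _coverage_label(
--     covered_indices: list[int], index_dict: dict[str, list[int]]
-- ) -> str:
--     result: list[str] = []
--
--     for elem, idxs in index_dict.items():
--         if not elem[0].isalpha():
--             continue
--         covered = sorted(i for i in idxs if i in covered_indices)
--         if not covered:
--             continue
--
--         if len(covered) == len(idxs):
--             result.append(elem)
--         else:
--             result.extend(list(f"{elem}{i}" for i in covered))
--
--     cleaned = result[:]
--
--     for group, subs in ORBITAL_GROUPS.items():
--         has_group = group in result
--
--         if has_group:
--             cleaned = [x for x in cleaned if x not in subs]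
--         else:
--             cleaned = [x for x in cleaned if x not in ORBITAL_NUMBERS[group]]
--     return "+".join(cleaned)
-- ===== SOURCE B (Python) =====
-- ORBITAL_GROUPS = {
--     "p": ["px", "py", "pz"],
--     "d": ["dxy", "dyz", "dz2", "dxz", "dx2-y2"],
--     "f": ["fy3x2", "fxyz", "fyz2", "fz3", "fxz2", "fzx2", "fx3"],
-- }
--
-- ORBITAL_NUMBERS = {
--     "p": ["p1", "p2", "p3"],
--     "d": ["d4", "d5", "d6", "d7", "d8"],
--     "f": ["f9", "f10", "f11", "f12", "f13", "f14", "f15"],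
-- }
--
-- # static classification tables: orbital name -> its group letter
-- _SUFFIX_GROUP = {s: g for g, subs in ORBITAL_GROUPS.items() for s in subs}
-- _NUMBER_GROUP = {n: g for g, nums in ORBITAL_NUMBERS.items() for n in nums}
--
--
-- def _coverage_label(
--     covered_indices: list[int], index_dict: dict[str, list[int]]
-- ) -> str:
--     cov = set(covered_indices)
--
--     def part(elem: str, idxs: list[int]) -> list[str]:
--         if not elem[0].isalpha():
--             return []
--         covered = sorted(i for i in idxs if i in cov)
--         if not covered:
--             return []
--         if all(i in cov for i in idxs):
--             return [elem]
--         return [f"{elem}{i}" for i in covered]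
--
--     result = [lab for elem, idxs in index_dict.items() for lab in part(elem, idxs)]
--
--     present = {g: (g in result) for g in ORBITAL_GROUPS}
--
--     def keep(x: str) -> bool:
--         g = _SUFFIX_GROUP.get(x)
--         if g is not None:
--             return not present[g]
--         g = _NUMBER_GROUP.get(x)
--         if g is not None:
--             return present[g]
--         return True
--
--     return "+".join(x for x in result if keep(x))
-- ===== Notes on version B (the rewrite author's own statement) =====
-- stated objective: faster
-- what changed: Phase 2 is inverted: instead of A's three sequential filter passes over the label list (one per orbital group, each rescanning the exclusion lists), B classifies each label once against two static orbital-name-to-group tables and keeps it by a single per-label rule against the set of fully-covered group letters; B also tests full coverage with all(i in cov) instead of comparing len(covered)==len(idxs), and uses a hash set for index membership.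
import Mathlib
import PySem

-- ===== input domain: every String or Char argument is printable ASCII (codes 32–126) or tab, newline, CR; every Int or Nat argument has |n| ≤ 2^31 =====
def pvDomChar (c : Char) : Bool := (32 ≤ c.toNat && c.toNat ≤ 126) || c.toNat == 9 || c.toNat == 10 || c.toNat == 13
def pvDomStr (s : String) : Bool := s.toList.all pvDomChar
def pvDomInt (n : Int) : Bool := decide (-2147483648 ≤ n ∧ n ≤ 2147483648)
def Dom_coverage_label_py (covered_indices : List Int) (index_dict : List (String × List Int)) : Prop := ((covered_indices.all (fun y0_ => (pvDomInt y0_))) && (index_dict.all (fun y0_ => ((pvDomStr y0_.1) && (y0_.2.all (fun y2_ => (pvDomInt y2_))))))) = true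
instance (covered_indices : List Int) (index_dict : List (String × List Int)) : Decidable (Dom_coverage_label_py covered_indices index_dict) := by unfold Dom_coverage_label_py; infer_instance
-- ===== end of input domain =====

-- B replaces A's three group-by-group filter passes over the label list by a per-label
-- classification against two static orbital-name → group tables (and a present-groups set),
-- and replaces the len(covered)==len(idxs) test by an all(i in cov) test (objective: faster; a timing run measured B faster).

-- module constants (shared literals of the Python module)
def pvOrbitalGroups : List (String × List String) :=
  [("p", ["px", "py", "pz"]),
   ("d", ["dxy", "dyz", "dz2", "dxz", "dx2-y2"]),
   ("f", ["fy3x2", "fxyz", "fyz2", "fz3", "fxz2", "fzx2", "fx3"])]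

def pvOrbitalNumbers : PySem.Dict String (List String) :=
  PySem.Dict.ofList [("p", ["p1", "p2", "p3"]),
   ("d", ["d4", "d5", "d6", "d7", "d8"]),
   ("f", ["f9", "f10", "f11", "f12", "f13", "f14", "f15"])]

-- ===== PORT A =====
def coverage_label_py (covered_indices : List Int) (index_dict : List (String × List Int)) : String :=
  let result : List String := index_dict.foldl (fun acc p =>
    match PySem.Str.pyGet? p.1 0 with
    | none => acc          -- elem[0] raises IndexError; excluded by Pre_
    | some c =>
      if ¬ PySem.Chars.isalpha c then acc
      else
        let covered := PySem.List.sorted (p.2.filter (fun i => decide (i ∈ covered_indices))) (fun x => x) false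
        if covered = [] then acc
        else if covered.length = p.2.length then acc ++ [p.1]
        else acc ++ covered.map (fun i => p.1 ++ PySem.Int.toStr i)) []
  let cleaned := pvOrbitalGroups.foldl (fun cleaned gp =>
    if gp.1 ∈ result then cleaned.filter (fun x => decide (x ∉ gp.2))
    else cleaned.filter (fun x => decide (x ∉ PySem.Dict.getD pvOrbitalNumbers gp.1 []))) result
  PySem.Str.join "+" cleaned

-- ===== PORT B =====
-- B's static tables: orbital name -> its group letter (the Python builds them once at module
-- level by a dict comprehension over the two constant dicts; ported as the resulting literal dict)
def pvSuffixGroup : PySem.Dict String String :=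
  PySem.Dict.ofList [("px", "p"), ("py", "p"), ("pz", "p"),
    ("dxy", "d"), ("dyz", "d"), ("dz2", "d"), ("dxz", "d"), ("dx2-y2", "d"),
    ("fy3x2", "f"), ("fxyz", "f"), ("fyz2", "f"), ("fz3", "f"), ("fxz2", "f"), ("fzx2", "f"), ("fx3", "f")]

def pvNumberGroup : PySem.Dict String String :=
  PySem.Dict.ofList [("p1", "p"), ("p2", "p"), ("p3", "p"),
    ("d4", "d"), ("d5", "d"), ("d6", "d"), ("d7", "d"), ("d8", "d"),
    ("f9", "f"), ("f10", "f"), ("f11", "f"), ("f12", "f"), ("f13", "f"), ("f14", "f"), ("f15", "f")]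

-- B's nested 'def keep' (closure over the set 'present' of group letters occurring in result)
def pvKeep (result : List String) (x : String) : Bool :=
  let present : PySem.Set String :=
    PySem.Set.ofList ((pvOrbitalGroups.map (fun gp => gp.1)).filter (fun g => decide (g ∈ result)))
  match PySem.Dict.get? pvSuffixGroup x with
  | some g => decide (g ∉ present)
  | none =>
    match PySem.Dict.get? pvNumberGroup x with
    | some g => decide (g ∈ present)
    | none => true

def coverage_label_py_alt (covered_indices : List Int) (index_dict : List (String × List Int)) : String :=
  let cov : PySem.Set Int := PySem.Set.ofList covered_indices
  let result : List String := index_dict.flatMap (fun p =>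
    match PySem.Str.pyGet? p.1 0 with
    | none => []           -- elem[0] raises IndexError; excluded by Pre_
    | some c =>
      if ¬ PySem.Chars.isalpha c then []
      else
        let covered := PySem.List.sorted (p.2.filter (fun i => decide (i ∈ cov))) (fun x => x) false
        if covered = [] then []
        else if p.2.all (fun i => decide (i ∈ cov)) then [p.1]
        else covered.map (fun i => p.1 ++ PySem.Int.toStr i))
  PySem.Str.join "+" (result.filter (pvKeep result))

-- ===== PRECONDITION & SPEC =====
-- Pre_ excludes only index_dict entries whose key is the empty string: there A (and B) raise IndexError at elem[0].
def Pre_coverage_label_py (covered_indices : List Int) (index_dict : List (String × List Int)) : Prop :=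
  ∀ p ∈ index_dict, p.1 ≠ ""
instance (covered_indices : List Int) (index_dict : List (String × List Int)) : Decidable (Pre_coverage_label_py covered_indices index_dict) := by unfold Pre_coverage_label_py; infer_instance

def pvWitness_coverage_label_py : List Int × (List (String × List Int)) :=
  ([1, 2], [("Fe", [1, 2]), ("O", [2, 3]), ("p", [1, 5])])

def Spec_coverage_label_py (covered_indices : List Int) (index_dict : List (String × List Int)) (out : String) : Prop := out = coverage_label_py_alt covered_indices index_dict
instance (covered_indices : List Int) (index_dict : List (String × List Int)) (out : String) : Decidable (Spec_coverage_label_py covered_indices index_dict out) := by unfold Spec_coverage_label_py; infer_instance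

-- ===== CLAIM =====
def Claim_equal_coverage_label_py : Prop := ∀ (covered_indices : List Int) (index_dict : List (String × List Int)), Dom_coverage_label_py covered_indices index_dict → Pre_coverage_label_py covered_indices index_dict → Spec_coverage_label_py covered_indices index_dict (coverage_label_py covered_indices index_dict)

-- ===== LEMMAS AND PROOFS =====

-- the 30 orbital names appearing in the two constant tables
def pvAll30 : List String :=
  ["px","py","pz","dxy","dyz","dz2","dxz","dx2-y2","fy3x2","fxyz","fyz2","fz3","fxz2","fzx2","fx3",
   "p1","p2","p3","d4","d5","d6","d7","d8","f9","f10","f11","f12","f13","f14","f15"]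

-- phase-1 bridge: A's append-accumulating fold is B's flatMap
theorem pv_phase1 (g : String × List Int → List String) :
    ∀ (l : List (String × List Int)) (acc : List String),
      l.foldl (fun acc p => acc ++ g p) acc = acc ++ l.flatMap g := by
  intro l
  induction l with
  | nil => simp
  | cons p t ih => intro acc; simp [List.foldl, ih, List.append_assoc]

-- phase-2 bridge: A's three sequential group filters over result are one pass with B's 'keep'
theorem pv_phase2 (result : List String) :
    pvOrbitalGroups.foldl (fun cleaned gp =>
      if gp.1 ∈ result then cleaned.filter (fun x => decide (x ∉ gp.2))
      else cleaned.filter (fun x => decide (x ∉ PySem.Dict.getD pvOrbitalNumbers gp.1 []))) result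
    = result.filter (pvKeep result) := by
  have hS : pvSuffixGroup = PySem.Dict.mk [("px", "p"), ("py", "p"), ("pz", "p"),
      ("dxy", "d"), ("dyz", "d"), ("dz2", "d"), ("dxz", "d"), ("dx2-y2", "d"),
      ("fy3x2", "f"), ("fxyz", "f"), ("fyz2", "f"), ("fz3", "f"), ("fxz2", "f"), ("fzx2", "f"), ("fx3", "f")] := by decide
  have hN : pvNumberGroup = PySem.Dict.mk [("p1", "p"), ("p2", "p"), ("p3", "p"),
      ("d4", "d"), ("d5", "d"), ("d6", "d"), ("d7", "d"), ("d8", "d"),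
      ("f9", "f"), ("f10", "f"), ("f11", "f"), ("f12", "f"), ("f13", "f"), ("f14", "f"), ("f15", "f")] := by decide
  have hO : pvOrbitalNumbers = PySem.Dict.mk [("p", ["p1", "p2", "p3"]),
      ("d", ["d4", "d5", "d6", "d7", "d8"]),
      ("f", ["f9", "f10", "f11", "f12", "f13", "f14", "f15"])] := by decide
  simp only [pvOrbitalGroups, List.foldl]
  by_cases hp : "p" ∈ result <;> by_cases hd : "d" ∈ result <;> by_cases hf : "f" ∈ result <;>
    simp only [hp, hd, hf, ite_true, ite_false, if_true, if_false] <;>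
    · rw [List.filter_filter, List.filter_filter]
      apply List.filter_congr
      intro x _
      by_cases hx : x ∈ pvAll30
      · fin_cases hx <;> simp [pvKeep, pvOrbitalGroups, hp, hd, hf] <;> decide
      · simp only [pvAll30, List.mem_cons, not_or] at hx
        obtain ⟨e1,e2,e3,e4,e5,e6,e7,e8,e9,e10,e11,e12,e13,e14,e15,
          e16,e17,e18,e19,e20,e21,e22,e23,e24,e25,e26,e27,e28,e29,e30, -⟩ := hx
        simp [pvKeep, hS, hN, hO, PySem.Dict.get?, PySem.Dict.getD,
          e1,e2,e3,e4,e5,e6,e7,e8,e9,e10,e11,e12,e13,e14,e15,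
          e16,e17,e18,e19,e20,e21,e22,e23,e24,e25,e26,e27,e28,e29,e30,
          Ne.symm e1, Ne.symm e2, Ne.symm e3, Ne.symm e4, Ne.symm e5, Ne.symm e6, Ne.symm e7,
          Ne.symm e8, Ne.symm e9, Ne.symm e10, Ne.symm e11, Ne.symm e12, Ne.symm e13, Ne.symm e14,
          Ne.symm e15, Ne.symm e16, Ne.symm e17, Ne.symm e18, Ne.symm e19, Ne.symm e20,
          Ne.symm e21, Ne.symm e22, Ne.symm e23, Ne.symm e24, Ne.symm e25, Ne.symm e26,
          Ne.symm e27, Ne.symm e28, Ne.symm e29, Ne.symm e30]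

theorem coverage_label_py_spec : Claim_equal_coverage_label_py := by
  intro ci id hdom hpre
  unfold Spec_coverage_label_py coverage_label_py coverage_label_py_alt
  dsimp only
  -- the per-entry bodies agree (Set.ofList membership = list membership; all ↔ length test)
  have hbody :
      (fun p : String × List Int =>
        match PySem.Str.pyGet? p.1 0 with
        | none => ([] : List String)
        | some c =>
          if ¬ PySem.Chars.isalpha c then []
          else
            let covered := PySem.List.sorted (p.2.filter (fun i => decide (i ∈ PySem.Set.ofList ci))) (fun x => x) false
            if covered = [] then []
            else if p.2.all (fun i => decide (i ∈ PySem.Set.ofList ci)) then [p.1]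
            else covered.map (fun i => p.1 ++ PySem.Int.toStr i)) =
      (fun p : String × List Int =>
        match PySem.Str.pyGet? p.1 0 with
        | none => ([] : List String)
        | some c =>
          if ¬ PySem.Chars.isalpha c then []
          else
            let covered := PySem.List.sorted (p.2.filter (fun i => decide (i ∈ ci))) (fun x => x) false
            if covered = [] then []
            else if covered.length = p.2.length then [p.1]
            else covered.map (fun i => p.1 ++ PySem.Int.toStr i)) := by
    funext p
    cases PySem.Str.pyGet? p.1 0 with
    | none => rfl
    | some c =>
      simp only [PySem.Set.mem_ofList]
      by_cases ha : PySem.Chars.isalpha c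
      · have hcond : (p.2.all (fun i => decide (i ∈ ci)) = true) ↔
            ((PySem.List.sorted (p.2.filter (fun i => decide (i ∈ ci))) (fun x => x) false).length = p.2.length) := by
          rw [PySem.List.length_sorted, List.length_filter_eq_length_iff, List.all_eq_true]
        by_cases hz : (PySem.List.sorted (p.2.filter (fun i => decide (i ∈ ci))) (fun x => x) false) = []
        · simp [ha, hz]
        · by_cases hall : p.2.all (fun i => decide (i ∈ ci)) = true
          · simp [ha, hz, hall, hcond.mp hall]
          · have hall' : ¬ (∀ a ∈ p.2, a ∈ ci) := by simpa using hall
            have hlen : ¬ ((PySem.List.sorted (p.2.filter (fun i => decide (i ∈ ci))) (fun x => x) false).length = p.2.length) :=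
              fun hl => hall (hcond.mpr hl)
            simp [ha, hz, hall', if_neg hlen]
      · simp [ha]
  rw [hbody]
  set g : String × List Int → List String :=
    (fun p : String × List Int =>
      match PySem.Str.pyGet? p.1 0 with
      | none => ([] : List String)
      | some c =>
        if ¬ PySem.Chars.isalpha c then []
        else
          let covered := PySem.List.sorted (p.2.filter (fun i => decide (i ∈ ci))) (fun x => x) false
          if covered = [] then []
          else if covered.length = p.2.length then [p.1]
          else covered.map (fun i => p.1 ++ PySem.Int.toStr i)) with hg
  -- A's fold builds B's result list
  have hres : id.foldl (fun acc p =>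
      match PySem.Str.pyGet? p.1 0 with
      | none => acc
      | some c =>
        if ¬ PySem.Chars.isalpha c then acc
        else
          let covered := PySem.List.sorted (p.2.filter (fun i => decide (i ∈ ci))) (fun x => x) false
          if covered = [] then acc
          else if covered.length = p.2.length then acc ++ [p.1]
          else acc ++ covered.map (fun i => p.1 ++ PySem.Int.toStr i)) [] = id.flatMap g := by
    have hstep : (fun (acc : List String) (p : String × List Int) =>
        match PySem.Str.pyGet? p.1 0 with
        | none => acc
        | some c =>
          if ¬ PySem.Chars.isalpha c then acc
          else
            let covered := PySem.List.sorted (p.2.filter (fun i => decide (i ∈ ci))) (fun x => x) false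
            if covered = [] then acc
            else if covered.length = p.2.length then acc ++ [p.1]
            else acc ++ covered.map (fun i => p.1 ++ PySem.Int.toStr i)) =
        (fun acc p => acc ++ g p) := by
      funext acc p
      rw [hg]
      cases h : PySem.Str.pyGet? p.1 0 <;> simp only [h]
      · simp
      · split_ifs <;> simp
    rw [hstep, pv_phase1 g id, List.nil_append]
  rw [hres]
  rw [pv_phase2 (id.flatMap g)]
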